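-- pv_equiv track=rewrite | github.com/Louis-Alamo/compilador | src/compiler/lexer/LexicalAnalizer.py | limpiar_cadenas
-- ===== SOURCE A (Python) =====
-- def limpiar_cadenas(lista_de_listas):
--     resultado = []
--     for linea in lista_de_listas:
--         nueva_linea = []
--         idx = 0
--         while idx < len(linea):
--             token = linea[idx]
--             if token == '"':
--                 nueva_linea.append(token)  # Conserva la comilla de apertura
--                 idx += 1
--                 # Busca cierre en la misma línea
--                 while idx < len(linea) and linea[idx] != '"':
--                     idx += 1
--                 if idx < len(linea) and linea[idx] == '"':
--                     nueva_linea.append(linea[idx])  # Conserva la comilla de cierre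
--                     idx += 1
--                 # Aquí NO debes hacer break, solo sigues procesando el resto de la línea
--             else:
--                 nueva_linea.append(token)
--                 idx += 1
--         resultado.append(nueva_linea)
--     return resultado
-- ===== SOURCE B (Python) =====
-- def limpiar_cadenas(lista_de_listas):
--     resultado = []
--     for linea in lista_de_listas:
--         nueva_linea = []
--         dentro = False
--         for token in linea:
--             if token == '"':
--                 nueva_linea.append(token)
--                 dentro = not dentro
--             elif not dentro:
--                 nueva_linea.append(token)
--         resultado.append(nueva_linea)
--     return resultado
-- ===== Notes on version B (the rewrite author's own statement) =====
-- stated objective: idiomatic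
-- what changed: Replaces A's index-driven while loop with a nested skip-ahead inner while by a flat single pass per line that keeps a boolean 'inside string' flag and flips it on each quote token.
import Mathlib
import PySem

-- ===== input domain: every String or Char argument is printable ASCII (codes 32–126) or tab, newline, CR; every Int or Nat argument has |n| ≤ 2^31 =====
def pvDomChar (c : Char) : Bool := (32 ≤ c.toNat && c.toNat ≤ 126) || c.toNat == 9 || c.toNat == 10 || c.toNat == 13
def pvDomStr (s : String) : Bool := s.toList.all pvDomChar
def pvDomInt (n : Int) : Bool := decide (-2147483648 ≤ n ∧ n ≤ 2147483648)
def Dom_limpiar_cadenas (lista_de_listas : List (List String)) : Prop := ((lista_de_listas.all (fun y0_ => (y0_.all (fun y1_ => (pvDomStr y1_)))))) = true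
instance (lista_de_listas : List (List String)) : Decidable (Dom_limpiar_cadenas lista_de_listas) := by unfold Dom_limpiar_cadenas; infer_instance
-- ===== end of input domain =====

-- B replaces A's nested skip-ahead inner while loop by a flat single pass per line
-- with a boolean inside-string flag (more idiomatic; same cost).


-- ===== PORT A =====
-- inner 'while idx < len(linea) and linea[idx] != '"'' skip loop: returns the suffix
-- starting at the first '"' (or [] if none)
def pvSkipA (xs : List String) : List String :=
  match xs with
  | [] => []
  | x :: rest => if x ≠ "\"" then pvSkipA rest else x :: rest

theorem pvSkipA_length_le (xs : List String) : (pvSkipA xs).length ≤ xs.length := by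
  induction xs with
  | nil => simp [pvSkipA]
  | cons x rest ih =>
    simp only [pvSkipA]
    split
    · exact Nat.le_succ_of_le ih
    · simp

-- outer 'while idx < len(linea)' loop of A, as structural descent on the remaining suffix
def pvLineA (linea : List String) : List String :=
  match linea with
  | [] => []
  | t :: rest =>
    if t = "\"" then
      match h : pvSkipA rest with
      | [] => [t]                       -- no closing quote on the line
      | q :: ys => t :: q :: pvLineA ys -- keep the closing quote, continue after it
    else t :: pvLineA rest
termination_by linea.length
decreasing_by
  · have := pvSkipA_length_le rest
    rw [h] at this
    simp only [List.length_cons] at this ⊢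
    omega
  · simp only [List.length_cons]
    omega

def limpiar_cadenas (lista_de_listas : List (List String)) : List (List String) :=
  lista_de_listas.map pvLineA

-- ===== PORT B =====
-- single pass with an inside-string flag; state = (nueva_linea, dentro)
def pvLineB (linea : List String) : List String :=
  (linea.foldl (fun st token =>
      if token = "\"" then (st.1 ++ [token], !st.2)
      else if st.2 then st
      else (st.1 ++ [token], st.2)) ([], false)).1

def limpiar_cadenas_alt (lista_de_listas : List (List String)) : List (List String) :=
  lista_de_listas.map pvLineB

-- ===== PRECONDITION & SPEC =====
def Spec_limpiar_cadenas (lista_de_listas : List (List String)) (out : List (List String)) : Prop := out = limpiar_cadenas_alt lista_de_listas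
instance (lista_de_listas : List (List String)) (out : List (List String)) : Decidable (Spec_limpiar_cadenas lista_de_listas out) := by unfold Spec_limpiar_cadenas; infer_instance

-- ===== CLAIM (what is proved, stated in full; the proofs are below) =====
def Claim_equal_limpiar_cadenas : Prop := ∀ (lista_de_listas : List (List String)), Dom_limpiar_cadenas lista_de_listas → Spec_limpiar_cadenas lista_de_listas (limpiar_cadenas lista_de_listas)

-- ===== LEMMAS AND PROOFS =====

def pvGoB (st : List String × Bool) (xs : List String) : List String × Bool :=
  xs.foldl (fun st token =>
      if token = "\"" then (st.1 ++ [token], !st.2)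
      else if st.2 then st
      else (st.1 ++ [token], st.2)) st

theorem pvGoB_true (xs : List String) (acc : List String) :
    pvGoB (acc, true) xs =
      match pvSkipA xs with
      | [] => (acc, true)
      | q :: ys => pvGoB (acc ++ [q], false) ys := by
  induction xs generalizing acc with
  | nil => simp [pvGoB, pvSkipA]
  | cons x rest ih =>
    by_cases hx : x = "\""
    · simp [pvGoB, pvSkipA, hx, List.foldl]
    · simpa [pvGoB, pvSkipA, hx, List.foldl] using ih acc

theorem pvGoB_false_fst (xs : List String) (acc : List String) :
    (pvGoB (acc, false) xs).1 = acc ++ pvLineA xs := by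
  induction xs using pvLineA.induct generalizing acc with
  | case1 => simp [pvGoB, pvLineA]
  | case2 rest h =>
    have h1 := pvGoB_true rest (acc ++ ["\""])
    rw [h] at h1
    simp only [pvGoB] at h1 ⊢
    simp only [List.foldl_cons, if_true, Bool.not_false] at h1 ⊢
    rw [h1]
    simp only [pvLineA, if_true]
    split <;> simp_all
  | case3 rest q ys h ih =>
    have h1 := pvGoB_true rest (acc ++ ["\""])
    rw [h] at h1
    have h2 := ih (acc ++ ["\"", q])
    simp only [pvGoB] at h1 h2 ⊢
    simp only [List.foldl_cons, if_true, Bool.not_false] at h1 h2 ⊢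
    rw [h1]
    simp only [List.append_assoc] at h2 ⊢
    simp only [List.singleton_append] at h2 ⊢
    rw [h2]
    simp only [pvLineA, if_true]
    split <;> simp_all
  | case4 x rest h ih =>
    have h2 := ih (acc ++ [x])
    simp only [pvGoB] at h2 ⊢
    simp only [List.foldl_cons, if_neg h] at h2 ⊢
    simp only [Bool.false_eq_true, if_false] at h2 ⊢
    rw [h2]
    simp [pvLineA, h]

theorem pvLine_eq (linea : List String) : pvLineA linea = pvLineB linea := by
  have h := pvGoB_false_fst linea []
  simp only [pvLineB]
  show pvLineA linea = (pvGoB ([], false) linea).1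
  rw [h]
  simp

-- ===== VERDICT (by name: the statement is the Claim_ definition above) =====
theorem limpiar_cadenas_spec : Claim_equal_limpiar_cadenas := by
  intro l _
  unfold Spec_limpiar_cadenas limpiar_cadenas limpiar_cadenas_alt
  exact List.map_congr_left (fun x _ => pvLine_eq x)
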